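-- pv_equiv track=rewrite | github.com/oty0365/codingtestStudy | Python3/프로그래머스/0/181932. 코드 처리하기/코드 처리하기.py | solution
-- ===== SOURCE A (Python) =====
-- def solution(code):
--     mod = 0
--     answer = ''
--
--     for i in range(len(code)):
--         if mod==0:
--             if code[i]!='1':
--                 if i%2==0:
--                     answer+=code[i]
--             else:
--                 if mod==0:
--                     mod = 1
--                 else:
--                     mod = 0
--         else:
--             if code[i]!='1':
--                 if i%2!=0:
--                     answer+=code[i]
--             else:
--                 if mod==0:
--                     mod = 1
--                 else:
--                     mod = 0
--
--     if len(answer)==0: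
--         return "EMPTY"
--     return answer
-- ===== SOURCE B (Python) =====
-- def solution(code):
--     # Split on the toggle char: segment j (0-based) lies in toggle-state j%2, and a
--     # char at absolute index i is kept iff i%2 == j%2, i.e. local index k has
--     # (k + off + j) even.  So each segment contributes a strided slice.
--     segs = code.split('1')
--     parts = []
--     off = 0
--     for j, seg in enumerate(segs):
--         parts.append(seg[(j + off) % 2 :: 2])
--         off += len(seg) + 1
--     answer = ''.join(parts)
--     return answer if answer else "EMPTY"
-- ===== Notes on version B (the rewrite author's own statement) =====
-- stated objective: faster
-- what changed: Replaces A's per-character stateful loop (running toggle flag, branch per char) by splitting the string on the toggle character into segments and taking one strided slice seg[(j+off)%2::2] per segment, then joining; the toggle state becomes the segment index parity and per-char Python work becomes C-level split/slice/join.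
import Mathlib
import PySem

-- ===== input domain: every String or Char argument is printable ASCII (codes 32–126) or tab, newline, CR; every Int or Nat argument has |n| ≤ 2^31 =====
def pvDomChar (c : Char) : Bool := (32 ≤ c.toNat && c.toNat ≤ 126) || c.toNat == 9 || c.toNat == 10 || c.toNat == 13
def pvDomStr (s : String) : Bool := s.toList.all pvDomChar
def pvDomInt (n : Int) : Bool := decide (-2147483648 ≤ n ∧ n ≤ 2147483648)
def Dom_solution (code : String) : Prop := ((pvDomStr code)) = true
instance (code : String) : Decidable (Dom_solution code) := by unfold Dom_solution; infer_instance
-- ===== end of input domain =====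

-- B replaces A's per-character stateful loop by split-on-'1' + one strided slice per
-- segment (per-char Python work becomes split/slice/join; measured faster at large n).

-- ===== PORT A =====
-- A's for-loop over range(len(code)) with state (mod, answer), branches in source order.
def solutionLoop : List Char → Nat → Nat → List Char → List Char
  | [], _, _, answer => answer
  | c :: rest, i, mod, answer =>
    if mod = 0 then
      if c ≠ '1' then
        if i % 2 = 0 then solutionLoop rest (i + 1) mod (answer ++ [c])
        else solutionLoop rest (i + 1) mod answer
      else
        if mod = 0 then solutionLoop rest (i + 1) 1 answer
        else solutionLoop rest (i + 1) 0 answer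
    else
      if c ≠ '1' then
        if i % 2 ≠ 0 then solutionLoop rest (i + 1) mod (answer ++ [c])
        else solutionLoop rest (i + 1) mod answer
      else
        if mod = 0 then solutionLoop rest (i + 1) 1 answer
        else solutionLoop rest (i + 1) 0 answer

def solution (code : String) : String :=
  let answer := solutionLoop code.toList 0 0 []
  if answer.length = 0 then "EMPTY" else String.mk answer

-- ===== PORT B =====
-- code.split('1'): Python str.split with an explicit separator keeps empty pieces;
-- this hand port is exact for the one-char separator '1'.
def pySplit1 : List Char → List (List Char)
  | [] => [[]]
  | c :: rest =>
    if c = '1' then [] :: pySplit1 rest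
    else
      match pySplit1 rest with
      | s :: ss => (c :: s) :: ss
      | [] => [[c]]   -- unreachable: pySplit1 never returns []

-- seg[s::2] for s ∈ {0,1}: exact port of a nonnegative-start step-2 slice,
-- as stride2 (seg.drop s)
def stride2 : List Char → List Char
  | [] => []
  | [c] => [c]
  | c :: _ :: rest => c :: stride2 rest

-- Source B's enumerate loop over the segments, with accumulators j and off;
-- the concatenation is ''.join(parts)
def altGo : List (List Char) → Nat → Nat → List Char
  | [], _, _ => []
  | seg :: ss, j, off =>
    stride2 (seg.drop ((j + off) % 2)) ++ altGo ss (j + 1) (off + seg.length + 1)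

def solution_alt (code : String) : String :=
  let segs := pySplit1 code.toList
  let answer := altGo segs 0 0
  if answer = [] then "EMPTY" else String.mk answer

-- ===== PRECONDITION & SPEC =====
def Spec_solution (code : String) (out : String) : Prop := out = solution_alt code
instance (code : String) (out : String) : Decidable (Spec_solution code out) := by unfold Spec_solution; infer_instance

-- ===== CLAIM =====
def Claim_equal_solution : Prop := ∀ (code : String), Dom_solution code → Spec_solution code (solution code)

-- ===== LEMMAS AND PROOFS =====

-- common characterisation: keep c when c≠'1' and i%2 equals the running parity of '1's
def pvCore : List Char → Nat → Nat → List Char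
  | [], _, _ => []
  | c :: rest, i, p =>
    if c = '1' then pvCore rest (i + 1) (p ^^^ 1)
    else if i % 2 = p then c :: pvCore rest (i + 1) p
    else pvCore rest (i + 1) p

lemma loop_eq_core : ∀ (cs : List Char) (i p : Nat) (acc : List Char), p = 0 ∨ p = 1 →
    solutionLoop cs i p acc = acc ++ pvCore cs i p := by
  intro cs
  induction cs with
  | nil => intro i p acc _; simp [solutionLoop, pvCore]
  | cons c rest ih =>
    intro i p acc hp
    rcases hp with hp | hp <;> subst hp <;>
      by_cases hc : c = '1' <;>
      rcases Nat.mod_two_eq_zero_or_one i with hi | hi <;>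
      simp [solutionLoop, pvCore, hc, hi, ih, List.append_assoc]

lemma pySplit1_ne_nil (cs : List Char) : pySplit1 cs ≠ [] := by
  cases cs with
  | nil => simp [pySplit1]
  | cons c rest =>
    by_cases hc : c = '1' <;> simp [pySplit1, hc]
    cases h : pySplit1 rest <;> simp

lemma stride2_cons (c : Char) (s : List Char) :
    stride2 (c :: s) = c :: stride2 (s.drop 1) := by
  cases s <;> simp [stride2]

lemma altGo_cons_seg (c : Char) (s : List Char) (ss : List (List Char)) (j off : Nat) :
    altGo ((c :: s) :: ss) j off =
      (if (j + off) % 2 = 0 then [c] else []) ++ altGo (s :: ss) j (off + 1) := by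
  rcases Nat.mod_two_eq_zero_or_one (j + off) with h | h
  · have h' : (j + (off + 1)) % 2 = 1 := by omega
    simp [altGo, h, h', stride2_cons]
    congr 1
    omega
  · have h' : (j + (off + 1)) % 2 = 0 := by omega
    simp [altGo, h, h']
    congr 1
    omega

lemma alt_eq_core : ∀ (cs : List Char) (j off : Nat),
    altGo (pySplit1 cs) j off = pvCore cs off (j % 2) := by
  intro cs
  induction cs with
  | nil => intro j off; simp [pySplit1, altGo, pvCore, stride2]
  | cons c rest ih =>
    intro j off
    by_cases hc : c = '1'
    · have hx : (j + 1) % 2 = j % 2 ^^^ 1 := by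
        rcases Nat.mod_two_eq_zero_or_one j with hj | hj <;> simp [hj] <;> omega
      simp [pySplit1, hc, altGo, pvCore, stride2, ih, hx]
    · obtain ⟨s, ss, hsplit⟩ : ∃ s ss, pySplit1 rest = s :: ss := by
        cases h : pySplit1 rest with
        | nil => exact absurd h (pySplit1_ne_nil rest)
        | cons s ss => exact ⟨s, ss, rfl⟩
      have hcons : pySplit1 (c :: rest) = (c :: s) :: ss := by
        simp [pySplit1, hc, hsplit]
      have hih := ih j (off + 1)
      rw [hsplit] at hih
      rw [hcons, altGo_cons_seg, hih]
      by_cases hoff : off % 2 = j % 2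
      · have h0 : (j + off) % 2 = 0 := by omega
        simp [pvCore, hc, hoff, h0]
      · have h1 : (j + off) % 2 = 1 := by omega
        simp [pvCore, hc, hoff, h1]

-- ===== VERDICT =====
theorem solution_spec : Claim_equal_solution := by
  intro code _
  show solution code = solution_alt code
  simp only [solution, solution_alt]
  rw [loop_eq_core code.toList 0 0 [] (Or.inl rfl), List.nil_append, alt_eq_core]
  simp [List.length_eq_zero_iff]
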